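-- pv_equiv track=rewrite | github.com/TemposTunes/iron_snek_demo | iron_snek_demo.py | snake_shuffle
-- ===== SOURCE A (Python) =====
-- def snake_shuffle(player_pos, player_body):
--     n=len(player_body)
--     to_move=player_pos
--     while(n>0):
--         n=n-1
--         temp = player_body[n]
--         player_body[n] = to_move
--         to_move = temp
--     return player_body
-- ===== SOURCE B (Python) =====
-- def snake_shuffle(player_pos, player_body):
--     if player_body:
--         player_body[:] = player_body[1:] + [player_pos]
--     return player_body
-- ===== Notes on version B (the rewrite author's own statement) =====
-- stated objective: simpler
-- what changed: Replaces the backward index-by-index swap-through loop with a single slice reassignment player_body[:] = player_body[1:] + [player_pos] (shift left, new position appended), guarded for the empty body.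
import Mathlib
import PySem

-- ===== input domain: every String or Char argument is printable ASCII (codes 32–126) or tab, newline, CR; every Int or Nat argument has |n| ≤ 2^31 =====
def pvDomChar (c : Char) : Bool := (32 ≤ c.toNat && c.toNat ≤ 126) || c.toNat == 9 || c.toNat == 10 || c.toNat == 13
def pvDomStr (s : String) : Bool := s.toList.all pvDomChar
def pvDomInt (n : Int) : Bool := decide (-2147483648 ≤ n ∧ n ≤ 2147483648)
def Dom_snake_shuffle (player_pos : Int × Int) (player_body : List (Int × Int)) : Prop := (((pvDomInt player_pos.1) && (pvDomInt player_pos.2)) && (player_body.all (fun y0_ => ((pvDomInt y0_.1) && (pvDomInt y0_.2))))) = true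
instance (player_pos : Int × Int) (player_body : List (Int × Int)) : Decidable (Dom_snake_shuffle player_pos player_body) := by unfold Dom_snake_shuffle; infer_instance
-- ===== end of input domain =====

-- B replaces A's backward swap-through loop by one slice reassignment (shift left, append
-- new position); both Pythons mutate player_body in place, equivalence is about the return value.

-- ===== PORT A =====
-- the while loop: n counts down; temp = body[n]; body[n] = to_move; to_move = temp.
-- index n is always 0 ≤ n < length, so List.getD/List.set are exact here (no IndexError path).
def snakeLoopA (player_body : List (Int × Int)) (to_move : Int × Int) : Nat → List (Int × Int)
  | 0 => player_body
  | n + 1 => snakeLoopA (player_body.set n to_move) (player_body.getD n to_move) n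

def snake_shuffle (player_pos : Int × Int) (player_body : List (Int × Int)) : List (Int × Int) :=
  snakeLoopA player_body player_pos player_body.length

-- ===== PORT B =====
-- Source B: if player_body: player_body[:] = player_body[1:] + [player_pos]
def snake_shuffle_alt (player_pos : Int × Int) (player_body : List (Int × Int)) : List (Int × Int) :=
  if player_body ≠ [] then PySem.List.slice player_body (some 1) none ++ [player_pos]
  else player_body

-- ===== PRECONDITION & SPEC =====
def Spec_snake_shuffle (player_pos : Int × Int) (player_body : List (Int × Int)) (out : List (Int × Int)) : Prop := out = snake_shuffle_alt player_pos player_body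
instance (player_pos : Int × Int) (player_body : List (Int × Int)) (out : List (Int × Int)) : Decidable (Spec_snake_shuffle player_pos player_body out) := by unfold Spec_snake_shuffle; infer_instance

-- ===== CLAIM (what is proved, stated in full; the proofs are below) =====
def Claim_equal_snake_shuffle : Prop := ∀ (player_pos : Int × Int) (player_body : List (Int × Int)), Dom_snake_shuffle player_pos player_body → Spec_snake_shuffle player_pos player_body (snake_shuffle player_pos player_body)

-- ===== LEMMAS AND PROOFS =====

-- the loop with fuel n+1 ≤ length shifts the first n+1 entries left and plants to_move at index n
theorem snakeLoopA_eq (n : Nat) : ∀ (body : List (Int × Int)) (pos : Int × Int),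
    n + 1 ≤ body.length →
    snakeLoopA body pos (n + 1) = (body.take (n + 1)).drop 1 ++ pos :: body.drop (n + 1) := by
  induction n with
  | zero =>
    intro body pos h
    match body with
    | [] => simp at h
    | x :: t => simp [snakeLoopA]
  | succ m ih =>
    intro body pos h
    have hm : m + 1 < body.length := by omega
    have hset : m + 1 ≤ (body.set (m + 1) pos).length := by simpa using hm.le
    rw [snakeLoopA, ih _ _ hset]
    have hget : body.getD (m + 1) pos = body[m + 1]'hm := by
      simp [List.getD, List.getElem?_eq_getElem hm]
    rw [hget]
    have hdropset : (body.set (m + 1) pos).drop (m + 1) = pos :: body.drop (m + 2) := by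
      rw [List.drop_eq_getElem_cons (by simpa using hm)]
      rw [List.drop_set_of_lt (by omega)]
      simp [List.getElem_set_self]
    have htakeset : (body.set (m + 1) pos).take (m + 1) = body.take (m + 1) := by
      rw [List.take_set]
      exact List.set_eq_of_length_le (by simp)
    rw [hdropset, htakeset]
    have htake : body.take (m + 1 + 1) = body.take (m + 1) ++ [body[m + 1]'hm] := by
      rw [List.take_add_one]
      simp [List.getElem?_eq_getElem hm]
    rw [htake, List.drop_append_of_le_length (by simp; omega)]
    simp

-- ===== VERDICT (by name: the statement is the Claim_ definition above) =====
theorem snake_shuffle_spec : Claim_equal_snake_shuffle := by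
  intro pos body _
  unfold Spec_snake_shuffle snake_shuffle snake_shuffle_alt
  match body with
  | [] => simp [snakeLoopA]
  | x :: t =>
    rw [show (x :: t).length = t.length + 1 from rfl,
        snakeLoopA_eq t.length (x :: t) pos (by simp), PySem.List.slice_from_one]
    simp
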